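-- pv_equiv track=rewrite | github.com/Gsllchb/code-jam-solutions | src/combining_classes.py | solve
-- ===== SOURCE A (Python) =====
-- from collections import Counter
--
-- def solve(L: list, R: list, K:list) -> int:
--     L_R = list(set(L + R))
--     L_R.sort(reverse=True)
--     left_counter = Counter(L)
--     right_counter = Counter(R)
--     res = 0
--     questions = [(i, k) for i, k in enumerate(K, start=1)]
--     questions.sort(key=lambda a: a[1])
--     weight = 0
--     total = 0
--     index = 0
--     prev = L_R[0] + 1
--     for i in L_R:
--         prev_weight = weight
--         total += (prev - i - 1) * weight
--         weight += right_counter[i]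
--         weight -= left_counter[i]
--         current = weight + left_counter[i]
--         total += current
--         while index < len(questions) and total >= questions[index][1]:
--             if total - current < questions[index][1]:
--                 res += questions[index][0] * i
--             else:
--                 res += questions[index][0] * (i + (total - current - questions[index][1]) // prev_weight + 1)
--             index += 1
--         if index == len(questions):
--             break
--         prev = i
--     return res
-- ===== SOURCE B (Python) =====
-- from collections import Counter
--
--
-- def solve(L: list, R: list, K: list) -> int:
--     # One descending pass builds a checkpoint table; each query is then
--     # answered independently by finding its first checkpoint with total >= k.
--     values = sorted(set(L + R), reverse=True)
--     left = Counter(L)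
--     right = Counter(R)
--     rows = []  # (total, current, prev_weight, value)
--     weight = 0
--     total = 0
--     prev = values[0] + 1 if values else 0
--     for v in values:
--         pw = weight
--         total += (prev - v - 1) * weight
--         weight += right[v] - left[v]
--         current = weight + left[v]
--         total += current
--         rows.append((total, current, pw, v))
--         prev = v
--     res = 0
--     for idx, k in enumerate(K, start=1):
--         for total, current, pw, v in rows:
--             if total >= k:
--                 if total - current < k:
--                     res += idx * v
--                 else:
--                     res += idx * (v + (total - current - k) // pw + 1)
--                 break
--     return res
-- ===== Notes on version B (the rewrite author's own statement) =====
-- stated objective: alternative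
-- what changed: A sorts the queries and answers them with a merged two-pointer while-loop inside the descending value pass (breaking early); B builds the checkpoint table (total, current, prev_weight, value) in one pass and then answers each query independently, unsorted, by scanning for its first checkpoint with total >= k.
import Mathlib
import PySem

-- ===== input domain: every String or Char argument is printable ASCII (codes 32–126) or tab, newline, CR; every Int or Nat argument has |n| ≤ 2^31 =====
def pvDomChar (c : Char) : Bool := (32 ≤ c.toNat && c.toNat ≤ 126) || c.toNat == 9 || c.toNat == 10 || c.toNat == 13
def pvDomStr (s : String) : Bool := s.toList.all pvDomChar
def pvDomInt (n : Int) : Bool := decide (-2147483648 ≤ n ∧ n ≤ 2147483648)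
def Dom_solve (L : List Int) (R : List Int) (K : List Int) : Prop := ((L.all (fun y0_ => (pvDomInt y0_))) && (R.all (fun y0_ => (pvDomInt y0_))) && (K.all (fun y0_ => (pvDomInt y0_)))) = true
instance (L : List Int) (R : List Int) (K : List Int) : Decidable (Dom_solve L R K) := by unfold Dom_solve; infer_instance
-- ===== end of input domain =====

-- B answers each query independently from a precomputed checkpoint table instead of
-- A's merged sorted-queries two-pointer pass; equal return value on Pre_ (alternative decomposition).

-- ===== PORT A =====
-- the inner while loop: drains the prefix of remaining (sorted) questions with total >= k
def solveWhile (total current pw v : Int) : List (Int × Int) → Int → List (Int × Int) × Int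
  | [], res => ([], res)
  | (idx, k) :: t, res =>
    if total ≥ k then
      if total - current < k then
        solveWhile total current pw v t (res + idx * v)
      else
        solveWhile total current pw v t
          (res + idx * (v + PySem.Int.floordiv (total - current - k) pw + 1))
    else ((idx, k) :: t, res)

-- the main 'for i in L_R' loop; 'rest' is the suffix questions[index:], break = rest empty
def solveLoop (lc rc : PySem.Dict Int Int) :
    List Int → List (Int × Int) → Int → Int → Int → Int → Int
  | [], _, _, _, _, res => res
  | v :: vs, rest, weight, total, prev, res =>
    let pw := weight
    let total := total + (prev - v - 1) * weight
    let weight := weight + rc.getD v 0 - lc.getD v 0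
    let current := weight + lc.getD v 0
    let total := total + current
    let wr := solveWhile total current pw v rest res
    if wr.1.isEmpty then wr.2
    else solveLoop lc rc vs wr.1 weight total v wr.2

def solve (L : List Int) (R : List Int) (K : List Int) : Int :=
  let L_R := PySem.List.sorted (PySem.Set.ofList (L ++ R)) (fun x => x) true
  let lc := PySem.Dict.counter L
  let rc := PySem.Dict.counter R
  let questions := PySem.List.sorted (PySem.List.enumerate K 1) (fun a => a.2) false
  -- prev = L_R[0] + 1 raises IndexError when L ++ R = []; Pre_ excludes it (headD default arbitrary)
  solveLoop lc rc L_R questions 0 0 (L_R.headD 0 + 1) 0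

-- ===== PORT B =====
-- one descending pass building the checkpoint table (total, current, prev_weight, value)
def rowsB (lc rc : PySem.Dict Int Int) :
    List Int → Int → Int → Int → List (Int × Int × Int × Int)
  | [], _, _, _ => []
  | v :: vs, weight, total, prev =>
    let pw := weight
    let total := total + (prev - v - 1) * weight
    let weight := weight + rc.getD v 0 - lc.getD v 0
    let current := weight + lc.getD v 0
    let total := total + current
    (total, current, pw, v) :: rowsB lc rc vs weight total v

-- answer one query (idx, k): first checkpoint with total >= k, A's formula there; 0 if none
def ansB (rows : List (Int × Int × Int × Int)) (idx k : Int) : Int :=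
  match rows.find? (fun r => decide (r.1 ≥ k)) with
  | none => 0
  | some (total, current, pw, v) =>
    if total - current < k then idx * v
    else idx * (v + PySem.Int.floordiv (total - current - k) pw + 1)

def solve_alt (L : List Int) (R : List Int) (K : List Int) : Int :=
  let values := PySem.List.sorted (PySem.Set.ofList (L ++ R)) (fun x => x) true
  let lc := PySem.Dict.counter L
  let rc := PySem.Dict.counter R
  let rows := rowsB lc rc values 0 0 (if values = [] then 0 else values.headD 0 + 1)
  (PySem.List.enumerate K 1).foldl (fun res p => res + ansB rows p.1 p.2) 0

-- ===== PRECONDITION & SPEC =====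
-- A raises IndexError (L_R[0]) when L ++ R = [], and ZeroDivisionError (prev_weight = 0 on the
-- first iteration, where total - current = 0 >= k) whenever K contains some k <= 0; Pre_ is
-- exactly the set of inputs on which A returns normally.
def Pre_solve (L : List Int) (R : List Int) (K : List Int) : Prop :=
  L ++ R ≠ [] ∧ ∀ k ∈ K, 1 ≤ k
instance (L : List Int) (R : List Int) (K : List Int) : Decidable (Pre_solve L R K) := by
  unfold Pre_solve; infer_instance
def pvWitness_solve : List Int × List Int × List Int := ([1, 3], [2, 5], [1, 2, 4])

def Spec_solve (L : List Int) (R : List Int) (K : List Int) (out : Int) : Prop :=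
  out = solve_alt L R K
instance (L : List Int) (R : List Int) (K : List Int) (out : Int) : Decidable (Spec_solve L R K out) := by
  unfold Spec_solve; infer_instance

-- ===== CLAIM (what is proved, stated in full; the proofs are below) =====
def Claim_equal_solve : Prop := ∀ (L : List Int) (R : List Int) (K : List Int),
  Dom_solve L R K → Pre_solve L R K → Spec_solve L R K (solve L R K)

-- ===== LEMMAS AND PROOFS =====

theorem foldl_add_sum (f : Int × Int → Int) (qs : List (Int × Int)) (res : Int) :
    qs.foldl (fun r p => r + f p) res = res + (qs.map f).sum := by
  induction qs generalizing res with
  | nil => simp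
  | cons q t ih => simp [List.foldl_cons, ih]; ring

-- solveWhile is a takeWhile/dropWhile split of the question list
theorem solveWhile_eq (total current pw v : Int) (qs : List (Int × Int)) (res : Int) :
    solveWhile total current pw v qs res =
      (qs.dropWhile (fun q => decide (q.2 ≤ total)),
       res + ((qs.takeWhile (fun q => decide (q.2 ≤ total))).map
         (fun q => if total - current < q.2 then q.1 * v
                   else q.1 * (v + PySem.Int.floordiv (total - current - q.2) pw + 1))).sum) := by
  induction qs generalizing res with
  | nil => simp [solveWhile]
  | cons q t ih =>
    obtain ⟨idx, k⟩ := q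
    by_cases h : total ≥ k
    · have hk : k ≤ total := h
      by_cases h2 : total - current < k
      · simp [solveWhile, h, h2, ih]; ring
      · simp [solveWhile, h, h2, ih]; ring
    · have hk : ¬ k ≤ total := h
      simp [solveWhile, h]

-- in a list sorted by second component, every element of the dropWhile suffix exceeds total
theorem dropWhile_all_gt (total : Int) (qs : List (Int × Int))
    (hs : qs.Pairwise (fun a b => a.2 ≤ b.2)) :
    ∀ q ∈ qs.dropWhile (fun q => decide (q.2 ≤ total)), ¬ q.2 ≤ total := by
  induction qs with
  | nil => simp
  | cons a t ih =>
    rw [List.pairwise_cons] at hs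
    by_cases h : a.2 ≤ total
    · simpa [List.dropWhile_cons, h] using ih hs.2
    · intro q hq
      simp only [List.dropWhile_cons, decide_eq_true_eq, h, ite_false] at hq
      rcases List.mem_cons.mp hq with rfl | hq'
      · exact h
      · exact fun hle => h (le_trans (hs.1 q hq') hle)

-- main invariant: the merged loop of A equals the per-query sum over B's checkpoint table
theorem loop_eq (lc rc : PySem.Dict Int Int) (vs : List Int) (qs : List (Int × Int))
    (w t p res : Int) (hs : qs.Pairwise (fun a b => a.2 ≤ b.2)) :
    solveLoop lc rc vs qs w t p res =
      res + (qs.map (fun q => ansB (rowsB lc rc vs w t p) q.1 q.2)).sum := by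
  induction vs generalizing qs w t p res with
  | nil =>
    simp [solveLoop, rowsB, ansB]
  | cons v vs ih =>
    -- names for the per-iteration values (same in both ports)
    set t1 := t + (p - v - 1) * w with ht1
    set w1 := w + rc.getD v 0 - lc.getD v 0 with hw1
    set cur := w1 + lc.getD v 0 with hcur
    set t2 := t1 + cur with ht2
    have hrows : rowsB lc rc (v :: vs) w t p =
        (t2, cur, w, v) :: rowsB lc rc vs w1 t2 v := by
      simp [rowsB, ht1, hw1, hcur, ht2]
    have hsplit := solveWhile_eq t2 cur w v qs res
    set pref := qs.takeWhile (fun q => decide (q.2 ≤ t2)) with hpref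
    set suf := qs.dropWhile (fun q => decide (q.2 ≤ t2)) with hsuf
    -- the answer of every prefix query is given by the head checkpoint
    have hansPref : ∀ q ∈ pref,
        ansB (rowsB lc rc (v :: vs) w t p) q.1 q.2 =
          (if t2 - cur < q.2 then q.1 * v
           else q.1 * (v + PySem.Int.floordiv (t2 - cur - q.2) w + 1)) := by
      intro q hq
      have hle : q.2 ≤ t2 := by
        have := List.mem_takeWhile_imp hq
        simpa using this
      simp [ansB, hrows, show t2 ≥ q.2 from hle]
    -- suffix queries skip the head checkpoint
    have hansSuf : ∀ q ∈ suf,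
        ansB (rowsB lc rc (v :: vs) w t p) q.1 q.2 =
          ansB (rowsB lc rc vs w1 t2 v) q.1 q.2 := by
      intro q hq
      have hgt : ¬ q.2 ≤ t2 := dropWhile_all_gt t2 qs hs q hq
      have : ¬ t2 ≥ q.2 := hgt
      simp [ansB, hrows, this]
    have hqs : pref ++ suf = qs := List.takeWhile_append_dropWhile
    have hsufSorted : suf.Pairwise (fun a b => a.2 ≤ b.2) :=
      hs.sublist (List.dropWhile_sublist _)
    have hLoop : solveLoop lc rc (v :: vs) qs w t p res =
        (if suf.isEmpty then
          res + (pref.map (fun q => if t2 - cur < q.2 then q.1 * v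
                   else q.1 * (v + PySem.Int.floordiv (t2 - cur - q.2) w + 1))).sum
         else solveLoop lc rc vs suf w1 t2 v
          (res + (pref.map (fun q => if t2 - cur < q.2 then q.1 * v
                   else q.1 * (v + PySem.Int.floordiv (t2 - cur - q.2) w + 1))).sum)) := by
      simp only [solveLoop, ← ht1, ← hw1, ← hcur, ← ht2, hsplit]
    have hmapPref : pref.map (fun q => ansB (rowsB lc rc (v :: vs) w t p) q.1 q.2) =
        pref.map (fun q => if t2 - cur < q.2 then q.1 * v
                   else q.1 * (v + PySem.Int.floordiv (t2 - cur - q.2) w + 1)) :=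
      List.map_congr_left hansPref
    have hmapSuf : suf.map (fun q => ansB (rowsB lc rc (v :: vs) w t p) q.1 q.2) =
        suf.map (fun q => ansB (rowsB lc rc vs w1 t2 v) q.1 q.2) :=
      List.map_congr_left hansSuf
    rw [hLoop, ← hqs, List.map_append, List.sum_append, hmapPref, hmapSuf]
    by_cases he : suf.isEmpty
    · have hnil : suf = [] := List.isEmpty_iff.mp he
      simp [hnil]
    · rw [if_neg (by simpa using he), ih suf w1 t2 v _ hsufSorted]
      ring

-- ===== VERDICT (by name: the statement is the Claim_ definition above) =====
theorem solve_spec : Claim_equal_solve := by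
  intro L R K _ _
  unfold Spec_solve solve solve_alt
  have hs : (PySem.List.sorted (PySem.List.enumerate K 1) (fun a => a.2) false).Pairwise
      (fun a b => a.2 ≤ b.2) := PySem.List.sorted_pairwise _ _
  rw [loop_eq _ _ _ _ _ _ _ _ hs, foldl_add_sum]
  have hperm : (PySem.List.sorted (PySem.List.enumerate K 1) (fun a => a.2) false).Perm
      (PySem.List.enumerate K 1) := PySem.List.sorted_perm _ _ _
  by_cases hnil : PySem.List.sorted (PySem.Set.ofList (L ++ R)) (fun x => x) true = []
  · simp only [hnil]
    exact congrArg (0 + ·) ((hperm.map _).sum_eq)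
  · simp only [if_neg hnil]
    exact congrArg (0 + ·) ((hperm.map _).sum_eq)
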